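-- pv_equiv track=rewrite | github.com/Genomika-Einstein/hepatites-virais | process_blast.py | separate_by_ref
-- ===== SOURCE A (Python) =====
-- def genotype(hit):
--     return hit[1].split('_')[-1]
--
-- def separate_by_ref(blast_table):
--     hash = {}
--     seen_genotypes = []
--     for hit in blast_table:
--         if hit[1] in hash:
--             hash[hit[1]].append(hit)
--         if genotype(hit) not in seen_genotypes:
--             seen_genotypes.append(genotype(hit))
--             hash[hit[1]] = [hit]
--     return hash
-- ===== SOURCE B (Python) =====
-- def separate_by_ref(blast_table):
--     # Pass 1: full index of hits grouped by reference, in first-appearance order.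
--     groups = {}
--     for hit in blast_table:
--         groups.setdefault(hit[1], []).append(hit)
--     # Pass 2: keep only the first reference seen for each genotype.
--     result = {}
--     seen = set()
--     for ref, hits in groups.items():
--         g = ref.split('_')[-1]
--         if g not in seen:
--             seen.add(g)
--             result[ref] = hits
--     return result
-- ===== Notes on version B (the rewrite author's own statement) =====
-- stated objective: alternative
-- what changed: B replaces A's single interleaved loop (which mutates the dict and the seen-genotype list per hit) by two passes: one pass builds a complete ref->hits index with setdefault/append, a second pass over the index copies only the first ref of each genotype into the result.
import Mathlib
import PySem

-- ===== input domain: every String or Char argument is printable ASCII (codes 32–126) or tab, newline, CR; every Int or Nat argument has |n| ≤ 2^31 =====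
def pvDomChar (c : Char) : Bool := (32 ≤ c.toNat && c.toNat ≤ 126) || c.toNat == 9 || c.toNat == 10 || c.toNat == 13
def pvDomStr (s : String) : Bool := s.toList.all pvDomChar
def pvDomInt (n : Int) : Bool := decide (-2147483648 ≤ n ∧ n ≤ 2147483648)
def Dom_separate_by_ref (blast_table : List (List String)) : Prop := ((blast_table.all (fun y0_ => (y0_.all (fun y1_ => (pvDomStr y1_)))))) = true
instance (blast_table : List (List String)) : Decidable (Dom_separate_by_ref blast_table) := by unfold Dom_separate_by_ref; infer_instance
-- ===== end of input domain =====

-- B re-groups in two passes (full ref->hits index, then a first-ref-per-genotype filter)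
-- instead of A's single interleaved loop; same result, similar cost (objective: alternative).

-- ===== PORT A =====

-- hit[1]; pyGet? is none only when the row has < 2 fields (IndexError, excluded by Pre_),
-- so the .getD "" default is never reached on admitted inputs.
def pvRef (hit : List String) : String := (PySem.List.pyGet? hit 1).getD ""

-- genotype(hit) = hit[1].split('_')[-1]; split with a nonempty separator is never empty,
-- so the [-1] lookup always succeeds and .getD "" is never reached.
def genotype (hit : List String) : String :=
  (PySem.List.pyGet? ((PySem.Str.split? (pvRef hit) "_").getD []) (-1)).getD ""

-- one iteration of A's loop body over state (hash, seen_genotypes)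
def pvStepA (st : PySem.Dict String (List (List String)) × List String)
    (hit : List String) : PySem.Dict String (List (List String)) × List String :=
  let h := if st.1.contains (pvRef hit)
           then st.1.modify (pvRef hit) [] (fun l => l ++ [hit])   -- hash[hit[1]].append(hit)
           else st.1
  if genotype hit ∈ st.2 then (h, st.2)
  else (h.insert (pvRef hit) [hit], st.2 ++ [genotype hit])

def separate_by_ref (blast_table : List (List String)) : List (String × List (List String)) :=
  (blast_table.foldl pvStepA (PySem.Dict.empty, [])).1.items

-- ===== PORT B =====

-- pass 1 body: groups.setdefault(hit[1], []).append(hit)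
def pvStepGroup (g : PySem.Dict String (List (List String)))
    (hit : List String) : PySem.Dict String (List (List String)) :=
  let r := (PySem.List.pyGet? hit 1).getD ""   -- hit[1], total on rows of length ≥ 2 (Pre_)
  (g.setdefault r []).modify r [] (fun l => l ++ [hit])

-- pass 2 body over (result, seen); ref.split('_')[-1] as in pvRef/genotype
def pvStepFilter (st : PySem.Dict String (List (List String)) × PySem.Set String)
    (p : String × List (List String)) : PySem.Dict String (List (List String)) × PySem.Set String :=
  let g := (PySem.List.pyGet? ((PySem.Str.split? p.1 "_").getD []) (-1)).getD ""
  if g ∈ st.2 then st else (st.1.insert p.1 p.2, PySem.Set.add st.2 g)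

def separate_by_ref_alt (blast_table : List (List String)) : List (String × List (List String)) :=
  let groups := blast_table.foldl pvStepGroup PySem.Dict.empty
  (groups.items.foldl pvStepFilter (PySem.Dict.empty, ([] : PySem.Set String))).1.items

-- ===== PRECONDITION & SPEC =====
-- Python A evaluates hit[1] on every row: a row with fewer than 2 fields raises IndexError.
def Pre_separate_by_ref (blast_table : List (List String)) : Prop :=
  ∀ hit ∈ blast_table, 2 ≤ hit.length
instance (blast_table : List (List String)) : Decidable (Pre_separate_by_ref blast_table) := by
  unfold Pre_separate_by_ref; infer_instance

def pvWitness_separate_by_ref : List (List String) :=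
  [["q1", "refA_1a", "90"], ["q2", "refB_1a", "80"], ["q3", "refC_2b", "70"], ["q4", "refA_1a", "60"]]

def Spec_separate_by_ref (blast_table : List (List String)) (out : List (String × List (List String))) : Prop := out = separate_by_ref_alt blast_table
instance (blast_table : List (List String)) (out : List (String × List (List String))) : Decidable (Spec_separate_by_ref blast_table out) := by unfold Spec_separate_by_ref; infer_instance

-- ===== CLAIM (what is proved, stated in full; the proofs are below) =====
def Claim_equal_separate_by_ref : Prop := ∀ (blast_table : List (List String)), Dom_separate_by_ref blast_table → Pre_separate_by_ref blast_table → Spec_separate_by_ref blast_table (separate_by_ref blast_table)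

-- ===== LEMMAS AND PROOFS =====

-- genotype computed from the ref string (shared shape of both ports' genotype expressions)
def pvGk (s : String) : String :=
  (PySem.List.pyGet? ((PySem.Str.split? s "_").getD []) (-1)).getD ""

-- the state transformer "append hit to the group of r if selected" (A's first branch)
def pvIns (r : String) (hit : List String)
    (st : PySem.Dict String (List (List String)) × PySem.Set String) :
    PySem.Dict String (List (List String)) × PySem.Set String :=
  ((if st.1.contains r then st.1.modify r [] (fun l => l ++ [hit]) else st.1), st.2)

theorem pvGeno_eq (hit : List String) : pvGk (pvRef hit) = genotype hit := rfl

theorem pvStepFilter_eq (st : PySem.Dict String (List (List String)) × PySem.Set String)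
    (p : String × List (List String)) :
    pvStepFilter st p =
      if pvGk p.1 ∈ st.2 then st else (st.1.insert p.1 p.2, PySem.Set.add st.2 (pvGk p.1)) := rfl

-- the filter pass never shrinks the seen set
theorem pvFilter_seen_mono (items : List (String × List (List String)))
    (st : PySem.Dict String (List (List String)) × PySem.Set String)
    (m : String) (hm : m ∈ st.2) : m ∈ (items.foldl pvStepFilter st).2 := by
  induction items generalizing st with
  | nil => simpa using hm
  | cons p t ih =>
    simp only [List.foldl_cons]
    apply ih
    rw [pvStepFilter_eq]
    split
    · exact hm
    · exact (PySem.Set.mem_add _ _ _).mpr (Or.inl hm)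

-- every key of the filter pass's result comes from the initial result or from the items
theorem pvFilter_contains (items : List (String × List (List String)))
    (st : PySem.Dict String (List (List String)) × PySem.Set String)
    (k : String) (hk : ((items.foldl pvStepFilter st).1.contains k) = true) :
    st.1.contains k = true ∨ k ∈ items.map Prod.fst := by
  induction items generalizing st with
  | nil => exact Or.inl (by simpa using hk)
  | cons p t ih =>
    simp only [List.foldl_cons] at hk
    rcases ih _ hk with h | h
    · rw [pvStepFilter_eq] at h
      split at h
      · exact Or.inl h
      · simp only at h
        rw [PySem.Dict.contains_insert] at h
        by_cases hkp : k = p.1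
        · exact Or.inr (by simp [hkp])
        · exact Or.inl (by simpa [hkp] using h)
    · exact Or.inr (by simp [h])

-- the genotype of every key of the items ends up in the seen set
theorem pvFilter_geno_mem (items : List (String × List (List String)))
    (st : PySem.Dict String (List (List String)) × PySem.Set String)
    (k : String) (hk : k ∈ items.map Prod.fst) :
    pvGk k ∈ (items.foldl pvStepFilter st).2 := by
  induction items generalizing st with
  | nil => simp at hk
  | cons p t ih =>
    simp only [List.map_cons, List.mem_cons] at hk
    simp only [List.foldl_cons]
    rcases hk with hk | hk
    · subst hk
      apply pvFilter_seen_mono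
      rw [pvStepFilter_eq]
      split
      · assumption
      · exact (PySem.Set.mem_add _ _ _).mpr (Or.inr rfl)
    · exact ih _ hk

-- two inserts at distinct keys commute when the first key is already present
theorem pvInsert_insert_comm {nu : Type} (d : PySem.Dict String nu) (r q : String) (x w : nu)
    (hr : d.contains r = true) (hq : q ≠ r) :
    (d.insert r x).insert q w = (d.insert q w).insert r x := by
  have h1 : (d.insert r x).contains q = d.contains q := by
    rw [PySem.Dict.contains_insert]; simp [hq]
  have h2 : (d.insert q w).contains r = true := by
    rw [PySem.Dict.contains_insert]; simp [hr]
  apply PySem.Dict.ext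
  by_cases hcq : d.contains q = true
  · rw [PySem.Dict.items_insert_of_contains _ _ (h1.trans hcq),
        PySem.Dict.items_insert_of_contains _ _ hr,
        PySem.Dict.items_insert_of_contains _ _ h2,
        PySem.Dict.items_insert_of_contains _ _ hcq,
        List.map_map, List.map_map]
    apply List.map_congr_left
    intro p _
    simp only [Function.comp_apply]
    by_cases hp1 : p.1 = r
    · simp [hp1, Ne.symm hq]
    · by_cases hp2 : p.1 = q
      · simp [hp2, hq]
      · simp [hp1, hp2]
  · have hcq' : d.contains q = false := by simpa using hcq
    rw [PySem.Dict.items_insert_of_not_contains _ _ (h1.trans hcq'),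
        PySem.Dict.items_insert_of_contains _ _ hr,
        PySem.Dict.items_insert_of_contains _ _ h2,
        PySem.Dict.items_insert_of_not_contains _ _ hcq',
        List.map_append]
    simp [hq]

-- one filter step commutes with appending hit to r's group
theorem pvStepFilter_comm (r : String) (hit : List String)
    (st : PySem.Dict String (List (List String)) × PySem.Set String)
    (p : String × List (List String)) :
    pvStepFilter (pvIns r hit st) (if p.1 == r then (r, p.2 ++ [hit]) else p) =
      pvIns r hit (pvStepFilter st p) := by
  obtain ⟨d, s⟩ := st
  obtain ⟨a, b⟩ := p
  by_cases hp : a = r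
  · subst hp
    simp only [beq_self_eq_true, if_true]
    simp only [pvIns, pvStepFilter_eq, PySem.Dict.modify]
    by_cases hg : pvGk a ∈ s
    · simp [hg]
    · by_cases hc : d.contains a = true
      · simp [hg, hc, PySem.Dict.getD_insert_self, PySem.Dict.insert_insert_self]
      · simp [hg, hc, PySem.Dict.getD_insert_self, PySem.Dict.insert_insert_self]
  · have hpb : (a == r) = false := by simp [hp]
    simp only [hpb, Bool.false_eq_true, if_false]
    simp only [pvIns, pvStepFilter_eq, PySem.Dict.modify]
    by_cases hg : pvGk a ∈ s
    · simp [hg]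
    · by_cases hc : d.contains r = true
      · simp only [hg, if_false, hc, if_true, PySem.Dict.contains_insert,
          Bool.or_eq_true, beq_iff_eq, Ne.symm hp, false_or,
          PySem.Dict.getD_insert_of_ne _ _ _ (Ne.symm hp)]
        exact congrArg (fun z => (z, PySem.Set.add s (pvGk a)))
          (pvInsert_insert_comm d r a _ b hc hp)
      · simp [hg, hc, PySem.Dict.contains_insert, Ne.symm hp]

-- appending a hit to the group of key r commutes with the whole filter pass
theorem pvFilter_modify (items : List (String × List (List String))) (r : String)
    (hit : List String)
    (st : PySem.Dict String (List (List String)) × PySem.Set String) :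
    (items.map (fun p => if p.1 == r then (r, p.2 ++ [hit]) else p)).foldl pvStepFilter
        (pvIns r hit st) =
      pvIns r hit (items.foldl pvStepFilter st) := by
  induction items generalizing st with
  | nil => rfl
  | cons p t ih =>
    simp only [List.map_cons, List.foldl_cons]
    rw [pvStepFilter_comm]
    exact ih _

-- each grouping step is a single dict-modify at the hit's ref
theorem pvStepGroup_eq_modify (g : PySem.Dict String (List (List String))) (hit : List String) :
    pvStepGroup g hit = g.modify (pvRef hit) [] (fun l => l ++ [hit]) := by
  show (g.setdefault (pvRef hit) []).modify (pvRef hit) [] (fun l => l ++ [hit]) =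
    g.modify (pvRef hit) [] (fun l => l ++ [hit])
  by_cases hc : g.contains (pvRef hit) = true
  · rw [PySem.Dict.setdefault_of_contains _ _ hc]
  · have hc' : g.contains (pvRef hit) = false := by simpa using hc
    rw [PySem.Dict.setdefault_of_not_contains _ _ hc']
    simp only [PySem.Dict.modify]
    rw [PySem.Dict.getD_insert_self, PySem.Dict.insert_insert_self,
        PySem.Dict.getD_of_not_contains _ _ hc']

-- the grouping dict has distinct keys
theorem pvGroups_nodup (l : List (List String)) :
    (l.foldl pvStepGroup PySem.Dict.empty).keys.Nodup := by
  have hbody : pvStepGroup =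
      fun (g : PySem.Dict String (List (List String))) hit =>
        g.modify (pvRef hit) [] ((fun (_ : PySem.Dict String (List (List String)))
          (hit : List String) (l : List (List String)) => l ++ [hit]) g hit) := by
    funext g hit
    exact pvStepGroup_eq_modify g hit
  rw [hbody]
  exact PySem.Dict.nodup_keys_foldl_modify_key l pvRef [] _ _ PySem.Dict.nodup_keys_empty

-- contains in terms of the items' keys
theorem pvContains_iff (d : PySem.Dict String (List (List String))) (k : String) :
    d.contains k = true ↔ k ∈ d.items.map Prod.fst := by
  rw [PySem.Dict.contains_iff_mem_keys]
  rfl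

-- MAIN INVARIANT: A's loop state equals the filter pass applied to B's full grouping
theorem pvMain (blast_table : List (List String)) :
    blast_table.foldl pvStepA (PySem.Dict.empty, []) =
    (blast_table.foldl pvStepGroup PySem.Dict.empty).items.foldl pvStepFilter
      (PySem.Dict.empty, ([] : PySem.Set String)) := by
  induction blast_table using List.reverseRecOn with
  | nil => rfl
  | append_singleton l hit ih =>
    rw [List.foldl_append, List.foldl_append, ih]
    set G := l.foldl pvStepGroup PySem.Dict.empty with hGdef
    set res := G.items.foldl pvStepFilter (PySem.Dict.empty, ([] : PySem.Set String)) with hres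
    simp only [List.foldl_cons, List.foldl_nil]
    set r := pvRef hit with hr
    by_cases hc : G.contains r = true
    · -- the ref was seen before: A only appends; B's group for r grows by hit
      have hmem : r ∈ G.items.map Prod.fst := (pvContains_iff G r).mp hc
      have hseen : genotype hit ∈ res.2 := by
        rw [← pvGeno_eq]
        exact pvFilter_geno_mem G.items _ r hmem
      have hA : pvStepA res hit = pvIns r hit res := by
        unfold pvStepA
        simp only [← hr, hseen, if_true]
        rfl
      rw [hA]
      -- B's side: groups' items are G's items with r's value extended by [hit]
      rw [pvStepGroup_eq_modify]
      unfold PySem.Dict.modify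
      rw [PySem.Dict.items_insert_of_contains _ _ hc]
      have hmap : List.map (fun p => if (p.1 == r) = true then (r, G.getD r [] ++ [hit]) else p)
          G.items = List.map (fun p => if (p.1 == r) = true then (r, p.2 ++ [hit]) else p)
          G.items := by
        apply List.map_congr_left
        intro p hp
        by_cases hp1 : p.1 = r
        · have : G.getD r [] = p.2 := by
            have h1 : (r, p.2) ∈ G.items := by
              obtain ⟨a, b⟩ := p; simp only at hp1; rw [hp1] at hp; exact hp
            have h2 := PySem.Dict.get?_of_mem_items G h1 (pvGroups_nodup l)
            unfold PySem.Dict.getD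
            rw [h2]
            rfl
          simp [hp1, this]
        · simp [hp1]
      rw [hmap]
      have hinit : (PySem.Dict.empty, ([] : PySem.Set String)) =
          pvIns r hit (PySem.Dict.empty, ([] : PySem.Set String)) := rfl
      rw [hinit, pvFilter_modify, ← hres]
    · -- a new ref: A may select it; B's grouping appends a fresh key
      have hc' : G.contains r = false := by simpa using hc
      have hnotmem : res.1.contains r = false := by
        by_contra h
        have h' : res.1.contains r = true := by simpa using h
        rcases pvFilter_contains G.items _ r h' with h | h
        · simp [PySem.Dict.contains_empty] at h
        · exact hc ((pvContains_iff G r).mpr h)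
      have hG' : pvStepGroup G hit = G.insert r [hit] := by
        rw [pvStepGroup_eq_modify]
        simp only [PySem.Dict.modify]
        rw [PySem.Dict.getD_of_not_contains _ _ hc']
        simp [← hr]
      rw [hG', PySem.Dict.items_insert_of_not_contains _ _ hc', List.foldl_append, ← hres]
      simp only [List.foldl_cons, List.foldl_nil]
      -- one step each side
      unfold pvStepA
      rw [pvStepFilter_eq]
      have hgen : genotype hit = pvGk r := (pvGeno_eq hit).symm
      simp only [← hr, hnotmem, Bool.false_eq_true, if_false, hgen]
      by_cases hg : pvGk r ∈ res.2
      · simp [hg]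
      · have hadd : PySem.Set.add res.2 (pvGk r) = res.2 ++ [pvGk r] := by
          unfold PySem.Set.add
          have hcn : res.2.contains (pvGk r) = false := by simpa using hg
          simp only [hcn, Bool.false_eq_true, if_false]
        rw [hadd]

-- ===== VERDICT (by name: the statement is the Claim_ definition above) =====
theorem separate_by_ref_spec : Claim_equal_separate_by_ref := by
  intro bt _ _
  unfold Spec_separate_by_ref separate_by_ref separate_by_ref_alt
  rw [pvMain]
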